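-- pv_equiv track=rewrite | github.com/AustinCheang/coding_questions | dynamic_programming/max_subset_sum_no_adjacent.py | maxSubsetSumNoAdjacent_2
-- ===== SOURCE A (Python) =====
-- def maxSubsetSumNoAdjacent_2(array):
--     # Time: O(n) | Space: O(1)
--     if len(array) == 0:
--         return 0
--     elif len(array) == 1:
--         return array[0]
--     else:
--         largest = max(array[0], array[1])
--         second_largest = array[0]
--
--         for i in range(2, len(array)):
--             current = max(largest, second_largest + array[i])
--             second_largest = largest
--             largest = current
--
--         return largest
-- ===== SOURCE B (Python) =====
-- def maxSubsetSumNoAdjacent_2(array):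
--     # Top-down memoization of f(i) = max(f(i-1), f(i-2) + array[i]),
--     # driven by an explicit work stack instead of a bottom-up sweep.
--     n = len(array)
--     if n == 0:
--         return 0
--     if n == 1:
--         return array[0]
--     memo = {0: array[0], 1: max(array[0], array[1])}
--     stack = [n - 1]
--     while stack:
--         i = stack.pop()
--         if i in memo:
--             continue
--         if (i - 1) in memo and (i - 2) in memo:
--             memo[i] = max(memo[i - 1], memo[i - 2] + array[i])
--         else:
--             stack.append(i)
--             stack.append(i - 1)
--             stack.append(i - 2)
--     return memo[n - 1]
-- ===== Notes on version B (the rewrite author's own statement) =====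
-- stated objective: alternative
-- what changed: Replaces the bottom-up sweep with two rolling scalars by top-down memoized recursion on the index, run with an explicit work stack and a memo dict.
import Mathlib
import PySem

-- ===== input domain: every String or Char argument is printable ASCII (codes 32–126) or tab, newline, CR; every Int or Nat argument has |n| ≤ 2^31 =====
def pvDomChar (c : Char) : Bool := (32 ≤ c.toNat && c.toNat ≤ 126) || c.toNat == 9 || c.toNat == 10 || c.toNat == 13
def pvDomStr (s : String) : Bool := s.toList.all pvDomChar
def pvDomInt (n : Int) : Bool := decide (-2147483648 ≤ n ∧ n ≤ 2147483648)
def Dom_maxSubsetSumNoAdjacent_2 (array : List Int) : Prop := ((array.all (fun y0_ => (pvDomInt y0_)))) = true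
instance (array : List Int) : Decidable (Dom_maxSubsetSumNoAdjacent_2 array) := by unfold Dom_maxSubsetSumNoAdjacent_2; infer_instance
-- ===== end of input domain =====

-- B replaces A's bottom-up two-scalar sweep by top-down memoized recursion on the index,
-- driven by an explicit work stack with a memo dict (objective: alternative decomposition, same O(n)).

-- ===== PORT A =====
def maxSubsetSumNoAdjacent_2 (array : List Int) : Int :=
  if array.length = 0 then 0
  else if array.length = 1 then PySem.List.pyGetD array 0 0
  else
    let init : Int × Int :=
      (max (PySem.List.pyGetD array 0 0) (PySem.List.pyGetD array 1 0),
       PySem.List.pyGetD array 0 0)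
    let r := (PySem.List.pyRange 2 (array.length : Int) 1).foldl
      (fun st i => (max st.1 (st.2 + PySem.List.pyGetD array i 0), st.1)) init
    r.1

-- ===== PORT B =====
-- B's Python work stack pops/pushes at the list END; here the Lean list HEAD is the stack top.
-- `fuel` only makes the while loop total; it is chosen large enough in maxSubsetSumNoAdjacent_2_alt.
def maxSubsetSumNoAdjacent_2_altLoop (array : List Int) :
    Nat → PySem.Dict Int Int → List Int → PySem.Dict Int Int
  | 0, memo, _ => memo
  | fuel+1, memo, stack =>
    match stack with
    | [] => memo
    | i :: rest =>
      if memo.contains i then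
        maxSubsetSumNoAdjacent_2_altLoop array fuel memo rest
      else if memo.contains (i-1) && memo.contains (i-2) then
        maxSubsetSumNoAdjacent_2_altLoop array fuel
          (memo.insert i (max (memo.getD (i-1) 0)
                              (memo.getD (i-2) 0 + PySem.List.pyGetD array i 0))) rest
      else
        maxSubsetSumNoAdjacent_2_altLoop array fuel memo ((i-2) :: (i-1) :: i :: rest)

def maxSubsetSumNoAdjacent_2_alt (array : List Int) : Int :=
  let n := array.length
  if n = 0 then 0
  else if n = 1 then PySem.List.pyGetD array 0 0
  else
    let memo0 : PySem.Dict Int Int :=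
      (PySem.Dict.empty.insert 0 (PySem.List.pyGetD array 0 0)).insert 1
        (max (PySem.List.pyGetD array 0 0) (PySem.List.pyGetD array 1 0))
    let memo := maxSubsetSumNoAdjacent_2_altLoop array (12*n+12) memo0 [(n : Int) - 1]
    memo.getD ((n : Int) - 1) 0

-- ===== PRECONDITION & SPEC =====
def Spec_maxSubsetSumNoAdjacent_2 (array : List Int) (out : Int) : Prop := out = maxSubsetSumNoAdjacent_2_alt array
instance (array : List Int) (out : Int) : Decidable (Spec_maxSubsetSumNoAdjacent_2 array out) := by unfold Spec_maxSubsetSumNoAdjacent_2; infer_instance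

-- ===== CLAIM (what is proved, stated in full; the proofs are below) =====
def Claim_equal_maxSubsetSumNoAdjacent_2 : Prop := ∀ (array : List Int), Dom_maxSubsetSumNoAdjacent_2 array → Spec_maxSubsetSumNoAdjacent_2 array (maxSubsetSumNoAdjacent_2 array)

-- ===== LEMMAS AND PROOFS =====

-- The common recurrence: f 0 = a[0], f 1 = max(a[0],a[1]), f (k+2) = max (f (k+1)) (f k + a[k+2]).
def pvF (array : List Int) : Nat → Int
  | 0 => array.getD 0 0
  | 1 => max (array.getD 0 0) (array.getD 1 0)
  | (k+2) => max (pvF array (k+1)) (pvF array k + array.getD (k+2) 0)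

-- the memo after stage k holds exactly f 0 .. f k
def pvInv (array : List Int) (memo : PySem.Dict Int Int) (k : Nat) : Prop :=
  ∀ x : Int, memo.get? x = if 0 ≤ x ∧ x ≤ (k : Int) then some (pvF array x.toNat) else none

-- the pending stack [j, j+1, …, j+d-1] (top first)
def pvStk : Nat → Nat → List Int
  | _, 0 => []
  | j, d+1 => (j : Int) :: pvStk (j+1) d

theorem pvA_fold (array : List Int) (t : Nat) :
    (PySem.List.pyRange 2 ((t+2 : Nat) : Int) 1).foldl
      (fun st i => (max st.1 (st.2 + PySem.List.pyGetD array i 0), st.1))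
      (max (array.getD 0 0) (array.getD 1 0), array.getD 0 0)
      = (pvF array (t+1), pvF array t) := by
  induction t with
  | zero =>
      rw [PySem.List.pyRange_one_eq_nil (by norm_num)]
      simp [pvF]
  | succ t ih =>
      have hcast : ((t+3 : Nat) : Int) = ((t+2 : Nat) : Int) + 1 := by push_cast; ring
      rw [hcast, PySem.List.pyRange_one_succ_right (by push_cast; omega), List.foldl_append, ih]
      simp only [List.foldl_cons, List.foldl_nil, PySem.List.pyGetD_natCast]
      rfl

theorem pvLoop_ok (array : List Int) :
    ∀ (fuel k j : Nat) (memo : PySem.Dict Int Int),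
      1 ≤ k → k ≤ array.length - 1 → k ≤ j → j ≤ array.length →
      (j = array.length → k = array.length - 1) →
      pvInv array memo k →
      (j ≠ array.length →
        10*(array.length - k) + (if j = k then 3 else 2*(j-k)) ≤ fuel) →
      (maxSubsetSumNoAdjacent_2_altLoop array fuel memo
          (pvStk j (array.length - j))).getD ((array.length : Int) - 1) 0
        = pvF array (array.length - 1) := by
  intro fuel
  induction fuel with
  | zero =>
      intro k j memo hk1 hk2 hkj hjn hend hinv hfuel
      have hj : j = array.length := by
        by_contra h
        have := hfuel h
        omega
      have hkn : k = array.length - 1 := hend hj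
      have hstk : pvStk j (array.length - j) = [] := by
        rw [hj]; simp [pvStk]
      rw [hstk]
      have hget := hinv ((array.length : Int) - 1)
      have hn2 : 2 ≤ array.length := by omega
      rw [maxSubsetSumNoAdjacent_2_altLoop]
      rw [PySem.Dict.getD_eq_get?_getD, hget]
      have hcond : (0 ≤ (array.length : Int) - 1 ∧ (array.length : Int) - 1 ≤ (k : Int)) := by
        constructor <;> [omega; omega]
      rw [if_pos hcond]
      have : ((array.length : Int) - 1).toNat = array.length - 1 := by omega
      simp [this]
  | succ fuel ih =>
      intro k j memo hk1 hk2 hkj hjn hend hinv hfuel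
      by_cases hj : j = array.length
      · -- empty stack: the loop returns memo
        have hkn : k = array.length - 1 := hend hj
        have hstk : pvStk j (array.length - j) = [] := by rw [hj]; simp [pvStk]
        rw [hstk, maxSubsetSumNoAdjacent_2_altLoop]
        rw [PySem.Dict.getD_eq_get?_getD, hinv ((array.length : Int) - 1)]
        have hn2 : 2 ≤ array.length := by omega
        have hcond : (0 ≤ (array.length : Int) - 1 ∧ (array.length : Int) - 1 ≤ (k : Int)) := by
          constructor <;> [omega; omega]
        rw [if_pos hcond]
        have : ((array.length : Int) - 1).toNat = array.length - 1 := by omega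
        simp [this]
      · have hjlt : j < array.length := lt_of_le_of_ne hjn hj
        have hmeas := hfuel hj
        have hstk : pvStk j (array.length - j) = (j : Int) :: pvStk (j+1) (array.length - (j+1)) := by
          have : array.length - j = (array.length - (j+1)) + 1 := by omega
          rw [this, pvStk]
        rw [hstk, maxSubsetSumNoAdjacent_2_altLoop]
        have hcontains : ∀ x : Int, memo.contains x = decide (0 ≤ x ∧ x ≤ (k : Int)) := by
          intro x
          rw [PySem.Dict.contains_eq_isSome_get?, hinv x]
          by_cases h : (0 ≤ x ∧ x ≤ (k : Int)) <;> simp [h]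
        by_cases hjk : j = k
        · -- top already memoized: skip
          have hc : memo.contains (j : Int) = true := by
            rw [hcontains]; exact decide_eq_true (by omega)
          rw [if_pos hc]
          apply ih k (j+1) memo hk1 hk2 (by omega) (by omega) (by omega) hinv
          intro h
          rw [if_neg (by omega)]
          split at hmeas <;> omega
        · have hjk' : k < j := lt_of_le_of_ne hkj (fun h => hjk h.symm)
          have hc : memo.contains (j : Int) = false := by
            rw [hcontains]; exact decide_eq_false (by omega)
          rw [if_neg (by simp [hc])]
          by_cases hjk1 : j = k + 1
          · -- dependencies ready: memoize f j
            have hc1 : memo.contains ((j : Int) - 1) = true := by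
              rw [hcontains]; exact decide_eq_true (by omega)
            have hc2 : memo.contains ((j : Int) - 2) = true := by
              rw [hcontains]; exact decide_eq_true (by omega)
            rw [if_pos (by rw [hc1, hc2]; rfl)]
            have hv1 : memo.getD ((j : Int) - 1) 0 = pvF array (j - 1) := by
              rw [PySem.Dict.getD_eq_get?_getD, hinv ((j : Int) - 1),
                if_pos (by constructor <;> omega)]
              have : ((j : Int) - 1).toNat = j - 1 := by omega
              simp [this]
            have hv2 : memo.getD ((j : Int) - 2) 0 = pvF array (j - 2) := by
              rw [PySem.Dict.getD_eq_get?_getD, hinv ((j : Int) - 2),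
                if_pos (by constructor <;> omega)]
              have : ((j : Int) - 2).toNat = j - 2 := by omega
              simp [this]
            have hvg : PySem.List.pyGetD array (j : Int) 0 = array.getD j 0 := by
              simp [PySem.List.pyGetD_natCast]
            have hfj : max (memo.getD ((j : Int) - 1) 0)
                (memo.getD ((j : Int) - 2) 0 + PySem.List.pyGetD array (j : Int) 0)
                = pvF array j := by
              rw [hv1, hv2, hvg]
              have hj2 : j = (j - 2) + 2 := by omega
              rw [hj2]
              have e1 : j - 2 + 2 - 1 = (j-2) + 1 := by omega
              have e2 : j - 2 + 2 - 2 = j - 2 := by omega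
              rw [e1, e2]
              rfl
            have hinv' : pvInv array
                (memo.insert (j : Int) (max (memo.getD ((j : Int) - 1) 0)
                  (memo.getD ((j : Int) - 2) 0 + PySem.List.pyGetD array (j : Int) 0))) (k+1) := by
              intro x
              rw [PySem.Dict.get?_insert]
              by_cases hx : x = (j : Int)
              · subst hx
                rw [if_pos rfl, if_pos (by constructor <;> omega)]
                rw [hfj]
                have : ((j : Nat) : Int).toNat = j := by omega
                rw [this]
              · rw [if_neg hx, hinv x]
                have : (0 ≤ x ∧ x ≤ (k : Int)) ↔ (0 ≤ x ∧ x ≤ ((k+1 : Nat) : Int)) := by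
                  constructor
                  · rintro ⟨h1, h2⟩; exact ⟨h1, by omega⟩
                  · rintro ⟨h1, h2⟩
                    refine ⟨h1, ?_⟩
                    have : x ≠ ((k+1 : Nat) : Int) := by
                      intro h; apply hx; rw [h]; congr 1; omega
                    omega
                by_cases h : (0 ≤ x ∧ x ≤ (k : Int))
                · rw [if_pos h, if_pos (this.mp h)]
                · rw [if_neg h, if_neg (fun hh => h (this.mpr hh))]
            apply ih (k+1) (j+1) _ (by omega) (by omega) (by omega) (by omega) (by omega) hinv'
            intro h
            rw [if_neg (by omega)]
            rw [if_neg hjk] at hmeas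
            omega
          · -- dependencies missing: push j, j-1, j-2
            have hc1 : memo.contains ((j : Int) - 1) = false := by
              rw [hcontains]; exact decide_eq_false (by omega)
            rw [if_neg (by rw [hc1]; simp)]
            have hj3 : 3 ≤ j := by omega
            have hstk' : ((j : Int) - 2) :: ((j : Int) - 1) :: (j : Int) :: pvStk (j+1) (array.length - (j+1))
                = pvStk (j-2) (array.length - (j-2)) := by
              have h1 : array.length - (j-2) = (array.length - (j-1)) + 1 := by omega
              have h2 : array.length - (j-1) = (array.length - j) + 1 := by omega
              have h3 : array.length - j = (array.length - (j+1)) + 1 := by omega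
              rw [h1, pvStk, h2, pvStk, h3, pvStk]
              have e1 : ((j - 2 : Nat) : Int) = (j : Int) - 2 := by omega
              have e2 : ((j - 2 + 1 : Nat) : Int) = (j : Int) - 1 := by omega
              have e3 : (j - 2 + 1 + 1 : Nat) = j := by omega
              rw [e1, e2, e3]
            rw [hstk']
            apply ih k (j-2) memo hk1 hk2 (by omega) (by omega) (by omega) hinv
            intro h
            rw [if_neg hjk] at hmeas
            by_cases hh : j - 2 = k
            · rw [if_pos hh]; omega
            · rw [if_neg hh]; omega

theorem pvInv_init (array : List Int) :
    pvInv array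
      ((PySem.Dict.empty.insert 0 (PySem.List.pyGetD array 0 0)).insert 1
        (max (PySem.List.pyGetD array 0 0) (PySem.List.pyGetD array 1 0))) 1 := by
  have hp0 : PySem.List.pyGetD array 0 0 = array.getD 0 0 := by
    simp [PySem.List.pyGetD_zero]
  have hp1 : PySem.List.pyGetD array 1 0 = array.getD 1 0 := by
    simp [PySem.List.pyGetD_ofNat']
  intro x
  rw [PySem.Dict.get?_insert, PySem.Dict.get?_insert]
  by_cases h1 : x = 1
  · subst h1
    rw [if_pos rfl, if_pos (by norm_num)]
    rw [hp0, hp1]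
    rfl
  · rw [if_neg h1]
    by_cases h0 : x = 0
    · subst h0
      rw [if_pos rfl, if_pos (by norm_num)]
      rw [hp0]
      rfl
    · rw [if_neg h0, PySem.Dict.get?_empty, if_neg (by omega)]

theorem maxSubsetSumNoAdjacent_2_spec : Claim_equal_maxSubsetSumNoAdjacent_2 := by
  unfold Claim_equal_maxSubsetSumNoAdjacent_2
  intro array _
  unfold Spec_maxSubsetSumNoAdjacent_2 maxSubsetSumNoAdjacent_2 maxSubsetSumNoAdjacent_2_alt
  by_cases h0 : array.length = 0
  · simp [h0]
  · by_cases h1 : array.length = 1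
    · simp [h1]
    · have hn2 : 2 ≤ array.length := by omega
      rw [if_neg h0, if_neg h1, if_neg h0, if_neg h1]
      -- A's side
      have ht : array.length = (array.length - 2) + 2 := by omega
      have hA : (PySem.List.pyRange 2 (array.length : Int) 1).foldl
          (fun st i => (max st.1 (st.2 + PySem.List.pyGetD array i 0), st.1))
          (max (PySem.List.pyGetD array 0 0) (PySem.List.pyGetD array 1 0),
           PySem.List.pyGetD array 0 0)
          = (pvF array ((array.length - 2) + 1), pvF array (array.length - 2)) := by
        have e0 : PySem.List.pyGetD array 0 0 = array.getD 0 0 := by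
          simp [PySem.List.pyGetD_zero]
        have e1 : PySem.List.pyGetD array 1 0 = array.getD 1 0 := by
          simp [PySem.List.pyGetD_ofNat']
        rw [e0, e1]
        rw [show ((array.length : Nat) : Int) = (((array.length - 2) + 2 : Nat) : Int) by omega]
        exact pvA_fold array (array.length - 2)
      -- B's side
      have hB := pvLoop_ok array (12*array.length+12) 1 (array.length - 1) _
        (le_refl 1) (by omega) (by omega) (by omega) (by omega) (pvInv_init array)
        (by intro _; split <;> omega)
      have hstk0 : pvStk (array.length - 1) (array.length - (array.length - 1))
          = [(array.length : Int) - 1] := by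
        have : array.length - (array.length - 1) = 1 := by omega
        rw [this, pvStk, pvStk]
        congr 1
        omega
      rw [hstk0] at hB
      simp only [hA]
      rw [hB]
      congr 1
      omega
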